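-- pv_equiv track=rewrite | github.com/yofn/pyacm | div3/1399/c.py | f
-- ===== SOURCE A (Python) =====
-- def f(l):
--     n  = len(l)
--     bl = [0]* 51
--     sl = [0]*101
--     for i in l:
--         bl[i] += 1
--     for i in range(1,51):
--         for j in range(i,51):
--             sl[i+j] += min(bl[i],bl[j]) if i!=j else bl[i]//2
--     return max(sl)
-- ===== SOURCE B (Python) =====
-- def f(l):
--     bl = [0] * 51
--     for x in l:
--         bl[x] += 1
--     ws = [i for i in range(1, 51) for _ in range(bl[i])]
--     n = len(ws)
--     best = 0
--     for s in range(2, 101):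
--         i, j, c = 0, n - 1, 0
--         while i < j:
--             t = ws[i] + ws[j]
--             if t == s:
--                 c += 1
--                 i += 1
--                 j -= 1
--             elif t < s:
--                 i += 1
--             else:
--                 j -= 1
--         best = max(best, c)
--     return best
-- ===== Notes on version B (the rewrite author's own statement) =====
-- stated objective: alternative
-- what changed: A accumulates a min-of-counts pair contribution for every value pair of its 51-cell histogram into a sum-indexed array sl and returns max(sl); B keeps the histogram but replaces the whole pairing computation: it expands the histogram into the sorted weight list (a counting sort) and, for each candidate sum 2..100, counts disjoint pairs with a two-pointer sweep over that list, tracking the running maximum - no sl array, no min/floordiv pair formula.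
import Mathlib
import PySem

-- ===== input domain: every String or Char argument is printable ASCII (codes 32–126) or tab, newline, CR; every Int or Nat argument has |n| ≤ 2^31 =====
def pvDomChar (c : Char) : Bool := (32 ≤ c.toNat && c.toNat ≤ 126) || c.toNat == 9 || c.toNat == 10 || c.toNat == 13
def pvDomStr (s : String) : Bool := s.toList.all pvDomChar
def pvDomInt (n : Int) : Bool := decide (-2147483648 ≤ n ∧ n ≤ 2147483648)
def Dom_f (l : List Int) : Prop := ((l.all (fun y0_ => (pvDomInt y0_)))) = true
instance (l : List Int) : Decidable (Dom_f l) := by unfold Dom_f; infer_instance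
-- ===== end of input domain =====

-- B replaces A's whole pairing computation (the min-of-counts accumulation into the sum-indexed
-- array sl and max(sl)): it expands the value histogram into the sorted weight list and counts,
-- for each candidate sum, the disjoint pairs by a two-pointer sweep (objective: alternative
-- algorithm, similar cost; return value only — neither side mutates its argument).

-- ===== PORT A =====
-- sl[k] += x : Python list item read-then-write; exact for every in-range (incl. negative) k,
-- the only case reached inside Pre_f.
def pyAddAt (sl : List Int) (k : Int) (x : Int) : List Int :=
  PySem.List.pySetD sl k (PySem.List.pyGetD sl k 0 + x)

def f (l : List Int) : Int :=
  let bl := l.foldl (fun bl i => pyAddAt bl i 1) (List.replicate 51 (0:Int))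
  let sl := (PySem.List.pyRange 1 51 1).foldl (fun sl i =>
      (PySem.List.pyRange i 51 1).foldl (fun sl j =>
        pyAddAt sl (i + j)
          (if i ≠ j then min (PySem.List.pyGetD bl i 0) (PySem.List.pyGetD bl j 0)
           else PySem.Int.floordiv (PySem.List.pyGetD bl i 0) 2)) sl)
      (List.replicate 101 (0:Int))
  -- max(sl): sl is never empty, so Python's max cannot raise; .getD 0 is unreachable
  (PySem.List.max? sl (fun y => y)).getD 0

-- ===== PORT B =====
-- Source B's 'while i < j' two-pointer loop; the Nat fuel only makes the loop total (it is always
-- called with fuel ≥ j - i, which bounds the number of iterations); xs[i], xs[j] are read with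
-- 0 ≤ i < j < len xs, so pyGetD's default is unreachable.
def tpLoop (xs : List Int) (s : Int) : Nat → Int → Int → Int → Int
  | 0, _, _, c => c
  | fuel+1, i, j, c =>
    if i < j then
      let t := PySem.List.pyGetD xs i 0 + PySem.List.pyGetD xs j 0
      if t = s then tpLoop xs s fuel (i+1) (j-1) (c+1)
      else if t < s then tpLoop xs s fuel (i+1) j c
      else tpLoop xs s fuel i (j-1) c
    else c

def f_alt (l : List Int) : Int :=
  let bl := l.foldl (fun bl x => pyAddAt bl x 1) (List.replicate 51 (0:Int))
  -- ws = [i for i in range(1, 51) for _ in range(bl[i])] ; bl[i] is never negative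
  let ws := (PySem.List.pyRange 1 51 1).flatMap
      (fun i => (PySem.List.pyRange 0 (PySem.List.pyGetD bl i 0) 1).map (fun _ => i))
  let n : Int := (ws.length : Int)
  (PySem.List.pyRange 2 101 1).foldl
    (fun best s => max best (tpLoop ws s (n - 1).toNat 0 (n - 1) 0)) 0

-- ===== PRECONDITION & SPEC =====
-- Pre_f excludes exactly the inputs on which both Pythons raise IndexError: an element x with
-- x > 50 or x < -51 is out of range for the 51-cell table bl that both A and B build
-- (Python's negative indexing admits -51 <= x <= -1).
def Pre_f (l : List Int) : Prop := ∀ x ∈ l, -51 ≤ x ∧ x < 51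
instance (l : List Int) : Decidable (Pre_f l) := by unfold Pre_f; infer_instance
def pvWitness_f : List Int := [1, 1, 2, 3, 50, -1]
def Spec_f (l : List Int) (out : Int) : Prop := out = f_alt l
instance (l : List Int) (out : Int) : Decidable (Spec_f l out) := by unfold Spec_f; infer_instance

-- ===== CLAIM (what is proved, stated in full; the proofs are below) =====
def Claim_equal_f : Prop := ∀ (l : List Int), Dom_f l → Pre_f l → Spec_f l (f l)

-- ===== LEMMAS AND PROOFS =====

-- ---------- shared value-level vocabulary ----------
def pvG (bl : List Int) (i : Int) : Int := PySem.List.pyGetD bl i 0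

-- A's pair contribution for values i ≤ j
def pvV (bl : List Int) (i j : Int) : Int :=
  if i ≠ j then min (pvG bl i) (pvG bl j) else PySem.Int.floordiv (pvG bl i) 2

-- A's cell s of sl, as a closed sum over i
def pvS (bl : List Int) (s : Int) : Int :=
  ((PySem.List.pyRange 1 51 1).map
    (fun i => if i ≤ s - i ∧ s - i ≤ 50 then pvV bl i (s - i) else 0)).sum

def pvCnt (ys : List Int) (v : Int) : Int := (ys.count v : Int)

-- the same quantity expressed over the multiset of values
def pvT (ys : List Int) (s i : Int) : Int :=
  if i ≤ s - i ∧ s - i ≤ 50 then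
    if i ≠ s - i then min (pvCnt ys i) (pvCnt ys (s - i))
    else PySem.Int.floordiv (pvCnt ys i) 2
  else 0

def pvF (ys : List Int) (s : Int) : Int := ((PySem.List.pyRange 1 51 1).map (pvT ys s)).sum

-- head/last recursion implemented by B's two-pointer loop
def gRec (s : Int) : List Int → Int
  | [] => 0
  | [_] => 0
  | x :: y :: rest =>
      let b := (y :: rest).getLastD 0
      if x + b = s then 1 + gRec s ((y :: rest).dropLast)
      else if x + b < s then gRec s (y :: rest)
      else gRec s (x :: (y :: rest).dropLast)
  termination_by l => l.length
  decreasing_by all_goals (simp [List.length_dropLast]; try omega)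

-- ---------- A-side: sl is the table of pvS ----------
lemma pyAddAt_length (sl : List Int) (k x : Int) : (pyAddAt sl k x).length = sl.length := by
  simp [pyAddAt, PySem.List.length_pySetD]

lemma pyGetD_pyAddAt (sl : List Int) (k x : Int) (m : Nat)
    (h0 : 0 ≤ k) (h1 : k < sl.length) :
    PySem.List.pyGetD (pyAddAt sl k x) (m : Int) 0 =
      PySem.List.pyGetD sl (m : Int) 0 + (if (m : Int) = k then x else 0) := by
  rw [pyAddAt, PySem.List.pySetD_of_nonneg sl _ h0]
  rw [PySem.List.pyGetD_natCast]
  have hk : PySem.List.pyGetD sl k 0 = sl.getD k.toNat 0 := by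
    have hkk : k = ((k.toNat : Nat) : Int) := by omega
    rw [hkk, PySem.List.pyGetD_natCast]
    simp
    rw [show max k 0 = k from max_eq_left h0]
  rw [hk]
  rw [PySem.List.pyGetD_natCast]
  simp [List.getD, List.getElem?_set]
  split_ifs with h2 h3 <;> simp_all <;> try omega

lemma foldl_pyAddAt_length {α : Type} (key val : α → Int) :
    ∀ (js : List α) (sl : List Int),
      (js.foldl (fun sl j => pyAddAt sl (key j) (val j)) sl).length = sl.length := by
  intro js
  induction js with
  | nil => intro sl; rfl
  | cons j js ih => intro sl; simp only [List.foldl_cons]; rw [ih, pyAddAt_length]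

lemma inner_gen (i : Int) (v : Int → Int → Int) :
    ∀ (js : List Int) (sl : List Int), js.Nodup →
      (∀ j ∈ js, 0 ≤ i + j ∧ i + j < sl.length) → ∀ (m : Nat),
      PySem.List.pyGetD (js.foldl (fun sl j => pyAddAt sl (i + j) (v i j)) sl) (m : Int) 0 =
        PySem.List.pyGetD sl (m : Int) 0 +
          (if (m : Int) - i ∈ js then v i ((m : Int) - i) else 0) := by
  intro js
  induction js with
  | nil => intro sl _ _ m; simp
  | cons j js ih =>
    intro sl hnd hb m
    simp only [List.foldl_cons]
    have hb' : ∀ j' ∈ js, 0 ≤ i + j' ∧ i + j' < (pyAddAt sl (i + j) (v i j)).length := by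
      intro j' hj'; rw [pyAddAt_length]; exact hb j' (List.mem_cons_of_mem _ hj')
    rw [ih _ (List.Nodup.of_cons hnd) hb' m]
    have hkey := hb j (List.mem_cons_self)
    rw [pyGetD_pyAddAt sl (i + j) (v i j) m hkey.1 (by exact_mod_cast hkey.2)]
    by_cases hj : (m : Int) - i = j
    · have hnotin : (m : Int) - i ∉ js := by rw [hj]; exact (List.nodup_cons.mp hnd).1
      have hm : (m : Int) = i + j := by omega
      rw [if_neg hnotin, if_pos hm,
          if_pos (show (m : Int) - i ∈ j :: js by rw [hj]; exact List.mem_cons_self), hj]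
      ring
    · have hm : ¬ (m : Int) = i + j := by omega
      have hmem : ((m : Int) - i ∈ j :: js) ↔ ((m : Int) - i ∈ js) := by
        simp [List.mem_cons, hj]
      rw [if_neg hm, if_congr hmem rfl rfl]
      ring

lemma outer_gen (v : Int → Int → Int) :
    ∀ (is_ : List Int) (sl : List Int), sl.length = 101 →
      (∀ i ∈ is_, 1 ≤ i ∧ i < 51) → ∀ (m : Nat),
      PySem.List.pyGetD
        (is_.foldl (fun sl i =>
          (PySem.List.pyRange i 51 1).foldl (fun sl j => pyAddAt sl (i + j) (v i j)) sl) sl)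
        (m : Int) 0 =
        PySem.List.pyGetD sl (m : Int) 0 +
          (is_.map (fun i => if i ≤ (m : Int) - i ∧ (m : Int) - i ≤ 50 then v i ((m : Int) - i) else 0)).sum := by
  intro is_
  induction is_ with
  | nil => intro sl _ _ m; simp
  | cons i is_ ih =>
    intro sl hlen hb m
    simp only [List.foldl_cons, List.map_cons, List.sum_cons]
    have hi := hb i (List.mem_cons_self)
    have hlen' : ((PySem.List.pyRange i 51 1).foldl (fun sl j => pyAddAt sl (i + j) (v i j)) sl).length = 101 := by
      rw [foldl_pyAddAt_length (fun j => i + j) (fun j => v i j), hlen]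
    rw [ih _ hlen' (fun i' hi' => hb i' (List.mem_cons_of_mem _ hi')) m]
    rw [inner_gen i v _ sl (PySem.List.nodup_pyRange_one i 51)
        (by intro j hj; rw [PySem.List.mem_pyRange_one] at hj; rw [hlen]; constructor <;> omega) m]
    have : ((m : Int) - i ∈ PySem.List.pyRange i 51 1) ↔ (i ≤ (m : Int) - i ∧ (m : Int) - i ≤ 50) := by
      rw [PySem.List.mem_pyRange_one]; omega
    rw [if_congr this rfl rfl]
    ring

lemma pyGetD_replicate (m : Nat) : PySem.List.pyGetD (List.replicate 101 (0:Int)) (m : Int) 0 = 0 := by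
  rw [PySem.List.pyGetD_natCast]
  rw [List.getD, List.getElem?_replicate]
  split_ifs <;> rfl

lemma sl_eq (bl : List Int) :
    ((PySem.List.pyRange 1 51 1).foldl (fun sl i =>
      (PySem.List.pyRange i 51 1).foldl (fun sl j =>
        pyAddAt sl (i + j) (pvV bl i j)) sl)
      (List.replicate 101 (0:Int))) =
    (PySem.List.pyRange 0 101 1).map (fun s => pvS bl s) := by
  have hlen : ((PySem.List.pyRange 1 51 1).foldl (fun sl i =>
      (PySem.List.pyRange i 51 1).foldl (fun sl j =>
        pyAddAt sl (i + j) (pvV bl i j)) sl) (List.replicate 101 (0:Int))).length = 101 := by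
    have : ∀ (is_ : List Int) (sl : List Int),
        (is_.foldl (fun sl i =>
          (PySem.List.pyRange i 51 1).foldl (fun sl j => pyAddAt sl (i + j) (pvV bl i j)) sl) sl).length = sl.length := by
      intro is_
      induction is_ with
      | nil => intro sl; rfl
      | cons i is_ ih =>
        intro sl; simp only [List.foldl_cons]
        rw [ih, foldl_pyAddAt_length (fun j => i + j) (fun j => pvV bl i j)]
    rw [this]; simp
  apply List.ext_getElem
  · rw [hlen]; simp [PySem.List.length_pyRange_one]
  · intro k hk1 hk2
    have hk : k < 101 := by rw [hlen] at hk1; exact hk1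
    have lhs : _ = _ := outer_gen (pvV bl) (PySem.List.pyRange 1 51 1) (List.replicate 101 (0:Int))
      (by simp) (by intro i hi; rw [PySem.List.mem_pyRange_one] at hi; omega) k
    rw [← List.getD_eq_getElem _ 0 hk1, ← PySem.List.pyGetD_natCast]
    show PySem.List.pyGetD _ ((k : Nat) : Int) 0 = _
    rw [lhs, pyGetD_replicate, zero_add]
    rw [List.getElem_map, PySem.List.getElem_pyRange_one]
    rw [pvS, zero_add]

lemma pvS_zero_of_small (bl : List Int) (s : Int) (hs : s < 2) : pvS bl s = 0 := by
  rw [pvS]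
  apply List.sum_eq_zero
  intro x hx
  obtain ⟨i, hi, rfl⟩ := List.mem_map.mp hx
  rw [PySem.List.mem_pyRange_one] at hi
  split_ifs with h
  · omega
  · rfl

-- max(sl) is the running maximum of pvS bl s over s = 2..100
lemma A_max (bl : List Int) :
    (PySem.List.max? ((PySem.List.pyRange 0 101 1).map (fun s => pvS bl s)) (fun y => y)).getD 0 =
    (PySem.List.pyRange 2 101 1).foldl (fun best s => max best (pvS bl s)) 0 := by
  rw [PySem.List.pyRange_one_cons (by norm_num : (0:Int) < 101),
      PySem.List.pyRange_one_cons (by norm_num : (0:Int) + 1 < 101)]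
  simp only [List.map_cons]
  rw [PySem.List.max?_id_cons, Option.getD_some]
  simp only [List.foldl_cons]
  rw [pvS_zero_of_small bl 0 (by norm_num), pvS_zero_of_small bl (0 + 1) (by norm_num)]
  rw [show max (0:Int) 0 = 0 from rfl, show (0:Int) + 1 + 1 = 2 by norm_num]
  rw [List.foldl_map]

lemma pvCnt_nil (v : Int) : pvCnt [] v = 0 := rfl

lemma pvCnt_cons (h : Int) (t : List Int) (v : Int) :
    pvCnt (h :: t) v = pvCnt t v + (if v = h then 1 else 0) := by
  simp [pvCnt, List.count_cons]
  split_ifs with h1 h2 h2 <;> simp_all <;> omega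

lemma pvCnt_append_singleton (t : List Int) (b v : Int) :
    pvCnt (t ++ [b]) v = pvCnt t v + (if v = b then 1 else 0) := by
  simp [pvCnt, List.count_append, List.count_cons]
  split_ifs with h1 h2 h2 <;> simp_all <;> omega

lemma pvCnt_nonneg (ys : List Int) (v : Int) : 0 ≤ pvCnt ys v := Int.natCast_nonneg _

lemma pvCnt_eq_zero_of_not_mem (ys : List Int) (v : Int) (h : v ∉ ys) : pvCnt ys v = 0 := by
  simp [pvCnt, List.count_eq_zero.mpr h]

lemma sum_map_single_diff :
    ∀ (L : List Int), L.Nodup → ∀ (a : Int), a ∈ L → ∀ (F G : Int → Int) (d : Int),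
      (∀ i ∈ L, i ≠ a → F i = G i) → F a = G a + d →
      (L.map F).sum = (L.map G).sum + d := by
  intro L
  induction L with
  | nil => intro _ a ha; exact absurd ha (List.not_mem_nil)
  | cons b L ih =>
    intro hnd a ha F G d hFG hFa
    simp only [List.map_cons, List.sum_cons]
    rcases List.mem_cons.mp ha with rfl | haL
    · have : (L.map F).sum = (L.map G).sum := by
        have : ∀ i ∈ L, F i = G i := by
          intro i hi
          exact hFG i (List.mem_cons_of_mem _ hi) (fun h => (List.nodup_cons.mp hnd).1 (h ▸ hi))
        rw [List.map_congr_left this]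
      rw [this, hFa]; ring
    · have hb : F b = G b := hFG b (List.mem_cons_self) (fun h => (List.nodup_cons.mp hnd).1 (h ▸ haL))
      rw [hb, ih (List.nodup_cons.mp hnd).2 a haL F G d (fun i hi => hFG i (List.mem_cons_of_mem _ hi)) hFa]
      ring

lemma mem_pyAddAt {sl : List Int} {k x e : Int} (he : e ∈ pyAddAt sl k x) :
    e ∈ sl ∨ e = PySem.List.pyGetD sl k 0 + x := by
  unfold pyAddAt PySem.List.pySetD PySem.List.pySet? at he
  cases h : PySem.List.pyIdx? sl.length k with
  | none => rw [h] at he; simp at he; exact Or.inl he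
  | some n =>
    rw [h] at he
    simp only [Option.map_some, Option.getD_some] at he
    exact List.mem_or_eq_of_mem_set he

lemma pyGetD_nonneg (sl : List Int) (k : Int) (h : ∀ e ∈ sl, 0 ≤ e) :
    0 ≤ PySem.List.pyGetD sl k 0 := by
  unfold PySem.List.pyGetD PySem.List.pyGet?
  cases hi : PySem.List.pyIdx? sl.length k with
  | none => simp
  | some n =>
    simp only [Option.bind_some]
    cases hg : sl[n]? with
    | none => simp
    | some y =>
      simp only [Option.getD_some]
      exact h y (List.mem_of_getElem? hg)

lemma bl_entries_nonneg (l : List Int) :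
    ∀ (bl : List Int), (∀ e ∈ bl, 0 ≤ e) →
      ∀ e ∈ l.foldl (fun bl x => pyAddAt bl x 1) bl, 0 ≤ e := by
  induction l with
  | nil => intro bl h e he; exact h e he
  | cons x t ih =>
    intro bl h e he
    refine ih (pyAddAt bl x 1) ?_ e he
    intro e' he'
    rcases mem_pyAddAt he' with hmem | rfl
    · exact h e' hmem
    · have := pyGetD_nonneg bl x h
      omega

-- ---------- the expansion ws of the histogram ----------
def wexp (bl : List Int) : List Int :=
  (PySem.List.pyRange 1 51 1).flatMap
    (fun i => (PySem.List.pyRange 0 (PySem.List.pyGetD bl i 0) 1).map (fun _ => i))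

lemma wblock (c i : Int) :
    (PySem.List.pyRange 0 c 1).map (fun _ => i) = List.replicate c.toNat i := by
  rw [List.eq_replicate_iff]
  constructor
  · rw [List.length_map, PySem.List.length_pyRange_one]; omega
  · intro b hb
    obtain ⟨_, _, rfl⟩ := List.mem_map.mp hb
    rfl

lemma wexp_eq_rep (bl : List Int) :
    wexp bl = (PySem.List.pyRange 1 51 1).flatMap
      (fun i => List.replicate (PySem.List.pyGetD bl i 0).toNat i) := by
  unfold wexp
  congr 1
  funext i
  exact wblock _ i

lemma wexp_mem (bl : List Int) : ∀ x ∈ wexp bl, 1 ≤ x ∧ x ≤ 50 := by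
  intro x hx
  rw [wexp_eq_rep] at hx
  obtain ⟨j, hj, hxj⟩ := List.mem_flatMap.mp hx
  rw [PySem.List.mem_pyRange_one] at hj
  rw [List.eq_of_mem_replicate hxj]
  omega

lemma sorted_rep_flatMap (cf : Int → Nat) :
    ∀ (L : List Int), L.Pairwise (· < ·) →
      (L.flatMap (fun i => List.replicate (cf i) i)).Pairwise (· ≤ ·) := by
  intro L
  induction L with
  | nil => intro _; simp
  | cons j L' ih =>
    intro hp
    rw [List.flatMap_cons, List.pairwise_append]
    refine ⟨List.pairwise_replicate.mpr (Or.inr (le_refl j)), ih (List.Pairwise.of_cons hp), ?_⟩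
    intro a ha b hb
    obtain ⟨j', hj', hbmem⟩ := List.mem_flatMap.mp hb
    have ha' := List.eq_of_mem_replicate ha
    have hb' := List.eq_of_mem_replicate hbmem
    have := (List.pairwise_cons.mp hp).1 j' hj'
    omega

lemma wexp_sorted (bl : List Int) : (wexp bl).Pairwise (· ≤ ·) := by
  rw [wexp_eq_rep]
  exact sorted_rep_flatMap _ _ (PySem.List.pairwise_lt_pyRange_one 1 51)

lemma pvCnt_append (a b : List Int) (v : Int) : pvCnt (a ++ b) v = pvCnt a v + pvCnt b v := by
  simp [pvCnt, List.count_append]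

lemma pvCnt_replicate (n : Nat) (i v : Int) :
    pvCnt (List.replicate n i) v = if v = i then (n : Int) else 0 := by
  simp only [pvCnt, List.count_replicate]
  split_ifs with h1 h2 h2 <;> simp_all

lemma count_rep_flatMap (cf : Int → Nat) (v : Int) :
    ∀ (L : List Int),
      pvCnt (L.flatMap (fun i => List.replicate (cf i) i)) v =
        (L.map (fun j => if v = j then (cf j : Int) else 0)).sum := by
  intro L
  induction L with
  | nil => simp [pvCnt_nil]
  | cons j L' ih =>
    rw [List.flatMap_cons, pvCnt_append, pvCnt_replicate, ih, List.map_cons, List.sum_cons]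

lemma wexp_count (bl : List Int) (hg : ∀ k : Int, 0 ≤ PySem.List.pyGetD bl k 0)
    (v : Int) (h1 : 1 ≤ v) (h2 : v ≤ 50) : pvCnt (wexp bl) v = pvG bl v := by
  rw [wexp_eq_rep, count_rep_flatMap]
  have hvmem : v ∈ PySem.List.pyRange 1 51 1 := by
    rw [PySem.List.mem_pyRange_one]; omega
  rw [sum_map_single_diff (PySem.List.pyRange 1 51 1) (PySem.List.nodup_pyRange_one 1 51) v hvmem
        _ (fun _ => (0:Int)) ((PySem.List.pyGetD bl v 0).toNat : Int)
        (fun i _ hiv => if_neg (fun h => hiv h.symm)) (by rw [if_pos rfl]; ring)]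
  have hz : ((PySem.List.pyRange 1 51 1).map (fun _ => (0:Int))).sum = 0 := by simp
  rw [hz, zero_add, pvG, Int.toNat_of_nonneg (hg v)]

lemma pvS_eq_pvF_wexp (bl : List Int) (hg : ∀ k : Int, 0 ≤ PySem.List.pyGetD bl k 0) (s : Int) :
    pvS bl s = pvF (wexp bl) s := by
  unfold pvS pvF
  apply congrArg List.sum
  apply List.map_congr_left
  intro i hi
  rw [PySem.List.mem_pyRange_one] at hi
  unfold pvT pvV
  by_cases hgd : i ≤ s - i ∧ s - i ≤ 50
  · rw [if_pos hgd, if_pos hgd,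
        wexp_count bl hg i (by omega) (by omega),
        wexp_count bl hg (s - i) (by omega) (by omega)]
  · rw [if_neg hgd, if_neg hgd]

-- ---------- the multiset lemma: gRec computes pvF on a sorted list ----------
lemma fd_zero : PySem.Int.floordiv 0 2 = 0 := by decide
lemma fd_one : PySem.Int.floordiv 1 2 = 0 := by decide
lemma fd_add_two (c : Int) : PySem.Int.floordiv (c + 2) 2 = PySem.Int.floordiv c 2 + 1 := by
  have := Int.add_mul_fdiv_right c 1 (by norm_num : (2:Int) ≠ 0)
  simpa [PySem.Int.floordiv] using this

lemma gRec_cons (s x : Int) (t : List Int) (h : t ≠ []) :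
    gRec s (x :: t) =
      (if x + t.getLast h = s then 1 + gRec s t.dropLast
       else if x + t.getLast h < s then gRec s t
       else gRec s (x :: t.dropLast)) := by
  cases t with
  | nil => exact absurd rfl h
  | cons y r =>
    show gRec s (x :: y :: r) = _
    rw [gRec]
    have : (y :: r).getLastD 0 = (y :: r).getLast (by simp) := by
      simp [List.getLastD_eq_getLast?, List.getLast?_eq_getLast]
    simp only [this]

lemma gRec_nil (s : Int) : gRec s [] = 0 := by simp [gRec]

lemma gRec_single (s x : Int) : gRec s [x] = 0 := by simp [gRec]

lemma gRec_short (s : Int) (ys : List Int) (h : ys.length ≤ 1) : gRec s ys = 0 := by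
  match ys with
  | [] => exact gRec_nil s
  | [x] => exact gRec_single s x
  | x :: y :: r => simp at h

lemma pvCnt_singleton (x v : Int) : pvCnt [x] v = if v = x then 1 else 0 := by
  rw [show ([x] : List Int) = x :: [] from rfl, pvCnt_cons, pvCnt_nil, zero_add]

lemma pvF_nil (s : Int) : pvF [] s = 0 := by
  unfold pvF
  apply List.sum_eq_zero
  intro z hz
  obtain ⟨i, _, rfl⟩ := List.mem_map.mp hz
  unfold pvT
  rw [pvCnt_nil, pvCnt_nil]
  split_ifs <;> first | rfl | exact fd_zero | simp

lemma pvF_single (s x : Int) : pvF [x] s = 0 := by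
  unfold pvF
  apply List.sum_eq_zero
  intro z hz
  obtain ⟨i, _, rfl⟩ := List.mem_map.mp hz
  unfold pvT
  rw [pvCnt_singleton, pvCnt_singleton]
  split_ifs <;> first | rfl | omega | exact fd_one | exact fd_zero

lemma M (s : Int) :
    ∀ (n : Nat) (ys : List Int), ys.length ≤ n → List.Pairwise (· ≤ ·) ys →
      (∀ x ∈ ys, 1 ≤ x ∧ x ≤ 50) → gRec s ys = pvF ys s := by
  intro n
  induction n with
  | zero =>
    intro ys hlen _ _
    have hnil : ys = [] := List.eq_nil_of_length_eq_zero (by omega)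
    subst hnil
    rw [pvF_nil, gRec_nil]
  | succ n ih =>
    intro ys hlen hsort hbd
    rcases ys with _ | ⟨x, t⟩
    · rw [pvF_nil, gRec_nil]
    rcases ht0 : t with _ | ⟨y, rest⟩
    · subst ht0; rw [pvF_single, gRec_single]
    have hne : t ≠ [] := by rw [ht0]; simp
    have hlt : t.length ≤ n := by simp only [List.length_cons] at hlen; omega
    have ht1 : 1 ≤ t.length := by rw [ht0]; simp
    rw [← ht0]
    set b := t.getLast hne with hbdef
    set mid := t.dropLast with hmiddef
    have hsnoc : t = mid ++ [b] := (List.dropLast_append_getLast hne).symm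
    have hys : x :: t = (x :: mid) ++ [b] := by rw [List.cons_append, ← hsnoc]
    have hbmem : b ∈ x :: t := List.mem_cons_of_mem _ (List.getLast_mem hne)
    have hxbd := hbd x (List.mem_cons_self)
    have hbbd := hbd b hbmem
    have hx_le : ∀ z ∈ x :: t, x ≤ z := by
      intro z hz
      rcases List.mem_cons.mp hz with rfl | hz'
      · exact le_refl z
      · exact (List.pairwise_cons.mp hsort).1 z hz'
    have hxb : x ≤ b := hx_le b hbmem
    have hle_b : ∀ z ∈ x :: t, z ≤ b := by
      intro z hz
      have hs2 := hsort
      rw [hys] at hs2 hz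
      rcases List.mem_append.mp hz with hz' | hz'
      · exact (List.pairwise_append.mp hs2).2.2 z hz' b (by simp)
      · have : z = b := by simpa using hz'
        omega
    have hc1 : ∀ v, pvCnt (x :: t) v =
        pvCnt mid v + (if v = x then 1 else 0) + (if v = b then 1 else 0) := by
      intro v
      rw [pvCnt_cons]
      conv_lhs => rw [hsnoc]
      rw [pvCnt_append_singleton]
      ring
    have hc2 : ∀ v, pvCnt (x :: t) v = pvCnt t v + (if v = x then 1 else 0) :=
      fun v => pvCnt_cons x t v
    have hc3 : ∀ v, pvCnt (x :: t) v = pvCnt (x :: mid) v + (if v = b then 1 else 0) := by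
      intro v
      conv_lhs => rw [hys]
      rw [pvCnt_append_singleton]
    have hmid_sub : mid.Sublist t := by rw [hmiddef]; exact List.dropLast_sublist t
    have hxmid_sub : (x :: mid).Sublist (x :: t) := hmid_sub.cons₂ x
    have hrec_t : gRec s t = pvF t s :=
      ih t hlt (List.Pairwise.of_cons hsort) (fun z hz => hbd z (List.mem_cons_of_mem _ hz))
    have hrec_mid : gRec s mid = pvF mid s :=
      ih mid (le_trans hmid_sub.length_le hlt)
        ((List.Pairwise.of_cons hsort).sublist hmid_sub)
        (fun z hz => hbd z (List.mem_cons_of_mem _ (hmid_sub.mem hz)))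
    have hrec_xmid : gRec s (x :: mid) = pvF (x :: mid) s := by
      apply ih (x :: mid) _ (hsort.sublist hxmid_sub) (fun z hz => hbd z (hxmid_sub.mem hz))
      have hml : mid.length = t.length - 1 := by rw [hmiddef]; exact List.length_dropLast
      simp only [List.length_cons]
      omega
    rw [gRec_cons s x t hne, ← hbdef, ← hmiddef]
    have hxmem : x ∈ PySem.List.pyRange 1 51 1 := by
      rw [PySem.List.mem_pyRange_one]; omega
    rcases lt_trichotomy (x + b) s with hlt3 | heq | hgt
    · -- x + b < s : drop the head
      rw [if_neg (by omega), if_pos hlt3, hrec_t]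
      unfold pvF
      apply congrArg List.sum
      apply List.map_congr_left
      intro i hi
      rw [PySem.List.mem_pyRange_one] at hi
      unfold pvT
      split_ifs with hg hii
      · -- min branch
        by_cases hix : i = x
        · subst hix
          have hzz : pvCnt (i :: t) (s - i) = 0 := by
            apply pvCnt_eq_zero_of_not_mem
            intro hmem
            have := hle_b _ hmem
            omega
          have hzz' : pvCnt t (s - i) = 0 := by
            apply pvCnt_eq_zero_of_not_mem
            intro hmem
            have := hle_b _ (List.mem_cons_of_mem _ hmem)
            omega
          rw [hzz, hzz']
          have n1 := pvCnt_nonneg t i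
          have n2 := pvCnt_nonneg (i :: t) i
          omega
        · have hsix : s - i ≠ x := by intro h; omega
          rw [hc2 i, hc2 (s - i), if_neg hix, if_neg hsix, add_zero, add_zero]
      · -- floordiv branch : i = s - i, so i ≠ x
        have hix : i ≠ x := by intro h; omega
        rw [hc2 i, if_neg hix, add_zero]
      · rfl
    · -- x + b = s : pair the two ends
      rw [if_pos heq, hrec_mid]
      have main : pvF (x :: t) s = pvF mid s + 1 := by
        unfold pvF
        apply sum_map_single_diff _ (PySem.List.nodup_pyRange_one 1 51) x hxmem _ _ 1
        · -- terms at i ≠ x are unchanged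
          intro i hi hix
          rw [PySem.List.mem_pyRange_one] at hi
          unfold pvT
          split_ifs with hg hii
          · by_cases hxb2 : x = b
            · have hsix : s - i ≠ x := by intro h; omega
              rw [hc1 i, hc1 (s - i), if_neg hix, if_neg hsix,
                  if_neg (by omega : ¬ i = b), if_neg (by omega : ¬ s - i = b)]
              ring_nf
            · have hib : i ≠ b := by intro h; omega
              have hsix : s - i ≠ x := by intro h; omega
              have hsib : s - i ≠ b := by intro h; omega
              rw [hc1 i, hc1 (s - i), if_neg hix, if_neg hsix, if_neg hib, if_neg hsib]
              ring_nf
          · -- i = s - i with i ≠ x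
            have hib : i ≠ b := by intro h; omega
            rw [hc1 i, if_neg hix, if_neg hib]
            ring_nf
          · rfl
        · -- the term at i = x gains exactly 1
          unfold pvT
          have hguard : x ≤ s - x ∧ s - x ≤ 50 := by omega
          by_cases hxb2 : x = b
          · have hsxx : ¬ x ≠ s - x := by omega
            rw [if_pos hguard, if_pos hguard, if_neg hsxx, if_neg hsxx]
            have e1 : pvCnt (x :: t) x = pvCnt mid x + 2 := by
              rw [hc1 x, if_pos rfl, if_pos hxb2]; ring
            rw [e1, fd_add_two]
          · have hsxx : x ≠ s - x := by omega
            rw [if_pos hguard, if_pos hguard, if_pos hsxx, if_pos hsxx]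
            have e1 : pvCnt (x :: t) x = pvCnt mid x + 1 := by
              rw [hc1 x, if_pos rfl, if_neg (by omega : ¬ x = b)]; ring
            have e2 : pvCnt (x :: t) (s - x) = pvCnt mid (s - x) + 1 := by
              rw [hc1 (s - x), if_neg (by omega : ¬ s - x = x), if_pos (by omega : s - x = b)]
              ring
            rw [e1, e2]
            omega
      rw [main]
      ring
    · -- x + b > s : drop the last
      rw [if_neg (by omega), if_neg (by omega), hrec_xmid]
      unfold pvF
      apply congrArg List.sum
      apply List.map_congr_left
      intro i hi
      rw [PySem.List.mem_pyRange_one] at hi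
      unfold pvT
      split_ifs with hg hii
      · have hib : i ≠ b := by intro h; omega
        by_cases hsib : s - i = b
        · have hiltx : i < x := by omega
          have hz1 : pvCnt (x :: mid) i = 0 := by
            apply pvCnt_eq_zero_of_not_mem
            intro hmem
            have := hx_le _ (hxmid_sub.mem hmem)
            omega
          have hz2 : pvCnt (x :: t) i = 0 := by
            apply pvCnt_eq_zero_of_not_mem
            intro hmem
            have := hx_le _ hmem
            omega
          rw [hz1, hz2]
          have n1 := pvCnt_nonneg (x :: mid) (s - i)
          have n2 := pvCnt_nonneg (x :: t) (s - i)
          omega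
        · rw [hc3 i, hc3 (s - i), if_neg hib, if_neg hsib, add_zero, add_zero]
      · have hib : i ≠ b := by intro h; omega
        rw [hc3 i, if_neg hib, add_zero]
      · rfl

-- ---------- the two-pointer loop computes gRec on the window ----------
lemma wcons (xs : List Int) (i j : Nat) (hij : i ≤ j) (hj : j < xs.length) :
    (xs.drop i).take (j + 1 - i) =
      xs[i]'(lt_of_le_of_lt hij hj) :: ((xs.drop (i+1)).take (j - i)) := by
  rw [List.drop_eq_getElem_cons (lt_of_le_of_lt hij hj)]
  rw [show j + 1 - i = (j - i) + 1 by omega]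
  rw [List.take_succ_cons]

lemma wsnoc (xs : List Int) (i j : Nat) (hij : i ≤ j) (hj : j < xs.length) :
    (xs.drop i).take (j + 1 - i) = ((xs.drop i).take (j - i)) ++ [xs[j]] := by
  rw [show j + 1 - i = (j - i) + 1 by omega]
  rw [List.take_succ]
  congr 1
  rw [List.getElem?_drop, show i + (j - i) = j by omega, List.getElem?_eq_getElem hj]
  rfl

lemma tp_win (xs : List Int) (s : Int) :
    ∀ (fuel : Nat) (i j : Nat) (c : Int), j < xs.length → j - i ≤ fuel →
      tpLoop xs s fuel (i : Int) (j : Int) c = c + gRec s ((xs.drop i).take (j + 1 - i)) := by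
  intro fuel
  induction fuel with
  | zero =>
    intro i j c hj hf
    rw [show tpLoop xs s 0 (i : Int) (j : Int) c = c from rfl]
    rw [gRec_short s _ (le_trans (List.length_take_le _ _) (by omega))]
    omega
  | succ fuel ih =>
    intro i j c hj hf
    by_cases hij : i < j
    · have hi_lt : i < xs.length := lt_trans hij hj
      have hj1 : 1 ≤ j := by omega
      have hW : (xs.drop (i+1)).take (j - i) =
          ((xs.drop (i+1)).take (j - 1 - i)) ++ [xs[j]] := by
        have := wsnoc xs (i+1) j (by omega) hj
        rw [show j + 1 - (i + 1) = j - i by omega, show j - (i + 1) = j - 1 - i by omega] at this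
        exact this
      have hWne : ((xs.drop (i+1)).take (j - i)) ≠ [] := by rw [hW]; simp
      have hWlast : ((xs.drop (i+1)).take (j - i)).getLast hWne = xs[j] := by
        have h1 : ((xs.drop (i+1)).take (j - i)).getLastD 0 = xs[j] := by
          rw [hW, List.getLastD_concat]
        rw [List.getLastD_eq_getLast?, List.getLast?_eq_some_getLast hWne] at h1
        simpa using h1
      have hWdrop : ((xs.drop (i+1)).take (j - i)).dropLast = (xs.drop (i+1)).take (j - 1 - i) := by
        rw [hW, List.dropLast_concat]
      have hwin : (xs.drop i).take (j + 1 - i) = xs[i] :: ((xs.drop (i+1)).take (j - i)) :=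
        wcons xs i j (by omega) hj
      have hcast : ((i : Int) < (j : Int)) := by exact_mod_cast hij
      simp only [tpLoop, if_pos hcast]
      rw [PySem.List.pyGetD_natCast, PySem.List.pyGetD_natCast,
          List.getD_eq_getElem xs 0 hi_lt, List.getD_eq_getElem xs 0 hj]
      rw [hwin, gRec_cons s _ _ hWne, hWlast, hWdrop]
      have ci : ((i : Int)) + 1 = (((i + 1 : Nat)) : Int) := by omega
      have cj : ((j : Int)) - 1 = (((j - 1 : Nat)) : Int) := by omega
      split_ifs with he hl
      · rw [ci, cj, ih (i+1) (j-1) (c+1) (by omega) (by omega),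
            show (j - 1) + 1 - (i + 1) = j - 1 - i by omega]
        ring
      · rw [ci, ih (i+1) j c (by omega) (by omega),
            show j + 1 - (i + 1) = j - i by omega]
      · rw [cj, ih i (j-1) c (by omega) (by omega),
            show (j - 1) + 1 - i = j - i by omega]
        rw [show (xs.drop i).take (j - i) = xs[i] :: ((xs.drop (i+1)).take (j - 1 - i)) from by
              have := wcons xs i (j-1) (by omega) (by omega)
              rw [show (j - 1) + 1 - i = j - i by omega, show j - 1 - i = (j-1) - i by omega] at this
              exact this]
    · have hcast : ¬ ((i : Int) < (j : Int)) := by exact_mod_cast hij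
      simp only [tpLoop, if_neg hcast]
      rw [gRec_short s _ (le_trans (List.length_take_le _ _) (by omega))]
      omega

lemma tp_whole (xs : List Int) (s : Int) :
    tpLoop xs s ((xs.length : Int) - 1).toNat 0 ((xs.length : Int) - 1) 0 = gRec s xs := by
  rcases xs with _ | ⟨x, t⟩
  · rw [gRec_nil]; rfl
  · have h1 : (((x :: t).length : Int) - 1).toNat = (x :: t).length - 1 := by
      simp only [List.length_cons]; omega
    have h2 : (((x :: t).length : Int) - 1) = (((x :: t).length - 1 : Nat) : Int) := by
      simp only [List.length_cons]; omega
    have key := tp_win (x :: t) s ((x :: t).length - 1) 0 ((x :: t).length - 1) 0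
      (by simp only [List.length_cons]; omega) (by omega)
    simp only [Nat.cast_zero] at key
    rw [h1, h2, key]
    rw [List.drop_zero, show (x :: t).length - 1 + 1 - 0 = (x :: t).length by
          simp only [List.length_cons]; omega,
        List.take_length, zero_add]

-- ===== VERDICT (by name: the statement is the Claim_ definition above) =====
theorem f_spec : Claim_equal_f := by
  intro l _ _
  simp only [Spec_f, f, f_alt]
  have e := sl_eq (l.foldl (fun bl i => pyAddAt bl i 1) (List.replicate 51 (0:Int)))
  simp only [pvV, pvG] at e
  rw [e, A_max]
  have hnn : ∀ e ∈ l.foldl (fun bl x => pyAddAt bl x 1) (List.replicate 51 (0:Int)), 0 ≤ e :=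
    bl_entries_nonneg l _ (fun e he => by rw [List.eq_of_mem_replicate he])
  have hg : ∀ k : Int,
      0 ≤ PySem.List.pyGetD (l.foldl (fun bl x => pyAddAt bl x 1) (List.replicate 51 (0:Int))) k 0 :=
    fun k => pyGetD_nonneg _ k hnn
  apply PySem.List.foldl_congr_mem
  intro best s _
  apply congrArg (max best)
  rw [show ((PySem.List.pyRange 1 51 1).flatMap
        (fun i => (PySem.List.pyRange 0
          (PySem.List.pyGetD (l.foldl (fun bl x => pyAddAt bl x 1) (List.replicate 51 (0:Int))) i 0)
          1).map (fun _ => i))) =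
      wexp (l.foldl (fun bl x => pyAddAt bl x 1) (List.replicate 51 (0:Int))) from rfl]
  rw [tp_whole, M s (wexp _).length _ le_rfl (wexp_sorted _) (wexp_mem _),
      pvS_eq_pvF_wexp _ hg s]
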